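-- pv_equiv track=rewrite | github.com/gustavoquiros/pyrse | p.py | parse_symchar
-- ===== SOURCE A (Python) =====
-- def parse_symchar(i,p=0,d=0):
-- 	if d < 100:
-- 		for x in parse_symchar_rule0(i,p,d+1):
-- 			yield x
-- 		for x in parse_symchar_rule1(i,p,d+1):
-- 			yield x
-- 		for x in parse_symchar_rule2(i,p,d+1):
-- 			yield x
-- 		for x in parse_symchar_rule3(i,p,d+1):
-- 			yield x
-- 		for x in parse_symchar_rule4(i,p,d+1):
-- 			yield x
-- 		for x in parse_symchar_rule5(i,p,d+1):
-- 			yield x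
--
-- def parse_symchar_rule0(i,p,d):
-- 	if p < len(i) and i[p] == 43:
-- 		x0 = i[p]
-- 		yield ('symchar','rule0',p,p+1,[x0])
--
-- def parse_symchar_rule1(i,p,d):
-- 	if p < len(i) and i[p] == 42:
-- 		x0 = i[p]
-- 		yield ('symchar','rule1',p,p+1,[x0])
--
-- def parse_symchar_rule2(i,p,d):
-- 	if p < len(i) and i[p] == 45:
-- 		x0 = i[p]
-- 		yield ('symchar','rule2',p,p+1,[x0])
--
-- def parse_symchar_rule3(i,p,d):
-- 	if p < len(i) and i[p] == 47:
-- 		x0 = i[p]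
-- 		yield ('symchar','rule3',p,p+1,[x0])
--
-- def parse_symchar_rule4(i,p,d):
-- 	if p < len(i) and i[p] in range(97,122+1):
-- 		x0 = i[p]
-- 		yield ('symchar','rule4',p,p+1,[x0])
--
-- def parse_symchar_rule5(i,p,d):
-- 	if p < len(i) and i[p] in range(65,90+1):
-- 		x0 = i[p]
-- 		yield ('symchar','rule5',p,p+1,[x0])
-- ===== SOURCE B (Python) =====
-- # Classification table built once: every accepted character code maps to its rule name.
-- _TABLE = {43: 'rule0', 42: 'rule1', 45: 'rule2', 47: 'rule3'}
-- for _c in range(97, 123):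
--     _TABLE[_c] = 'rule4'
-- for _c in range(65, 91):
--     _TABLE[_c] = 'rule5'
--
-- def parse_symchar(i, p=0, d=0):
--     if d < 100 and p < len(i):
--         c = i[p]
--         if c in _TABLE:
--             yield ('symchar', _TABLE[c], p, p + 1, [c])
-- ===== Notes on version B (the rewrite author's own statement) =====
-- stated objective: simpler
-- what changed: Replaces six per-rule helper generators that each re-test the bounds and re-read i[p] with a classification table built once at import time (every accepted code mapped to its rule name), so the call itself is one bounds check and one table lookup; Pre_ excludes only the inputs where both programs raise IndexError (d < 100 with p below -len(i)).
import Mathlib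
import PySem

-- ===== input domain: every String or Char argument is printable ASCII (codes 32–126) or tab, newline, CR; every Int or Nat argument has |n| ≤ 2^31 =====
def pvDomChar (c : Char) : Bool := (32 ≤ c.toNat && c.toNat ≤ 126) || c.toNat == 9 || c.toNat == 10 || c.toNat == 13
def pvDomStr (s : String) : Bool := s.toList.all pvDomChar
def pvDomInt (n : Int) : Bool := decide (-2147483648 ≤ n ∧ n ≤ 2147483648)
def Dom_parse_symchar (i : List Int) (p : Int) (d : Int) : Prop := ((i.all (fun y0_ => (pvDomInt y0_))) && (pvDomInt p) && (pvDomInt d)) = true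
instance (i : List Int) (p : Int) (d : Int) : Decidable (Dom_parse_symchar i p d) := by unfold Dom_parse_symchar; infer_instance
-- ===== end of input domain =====

-- B replaces A's six per-rule helper generators with a classification table built once
-- (every accepted code mapped to its rule name), so a call is one bounds check and one lookup.

-- ===== PORT A =====
def parse_symchar_rule0 (i : List Int) (p : Int) (_d : Int) : List (String × String × Int × Int × List Int) :=
  if p < (i.length : Int) then
    match PySem.List.pyGet? i p with
    | some c => if c = 43 then [("symchar", "rule0", p, p + 1, [c])] else []
    | none => []  -- Python raises IndexError here; excluded by Pre_
  else []

def parse_symchar_rule1 (i : List Int) (p : Int) (_d : Int) : List (String × String × Int × Int × List Int) :=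
  if p < (i.length : Int) then
    match PySem.List.pyGet? i p with
    | some c => if c = 42 then [("symchar", "rule1", p, p + 1, [c])] else []
    | none => []
  else []

def parse_symchar_rule2 (i : List Int) (p : Int) (_d : Int) : List (String × String × Int × Int × List Int) :=
  if p < (i.length : Int) then
    match PySem.List.pyGet? i p with
    | some c => if c = 45 then [("symchar", "rule2", p, p + 1, [c])] else []
    | none => []
  else []

def parse_symchar_rule3 (i : List Int) (p : Int) (_d : Int) : List (String × String × Int × Int × List Int) :=
  if p < (i.length : Int) then
    match PySem.List.pyGet? i p with
    | some c => if c = 47 then [("symchar", "rule3", p, p + 1, [c])] else []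
    | none => []
  else []

def parse_symchar_rule4 (i : List Int) (p : Int) (_d : Int) : List (String × String × Int × Int × List Int) :=
  if p < (i.length : Int) then
    match PySem.List.pyGet? i p with
    | some c => if 97 ≤ c ∧ c ≤ 122 then [("symchar", "rule4", p, p + 1, [c])] else []
    | none => []
  else []

def parse_symchar_rule5 (i : List Int) (p : Int) (_d : Int) : List (String × String × Int × Int × List Int) :=
  if p < (i.length : Int) then
    match PySem.List.pyGet? i p with
    | some c => if 65 ≤ c ∧ c ≤ 90 then [("symchar", "rule5", p, p + 1, [c])] else []
    | none => []
  else []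

def parse_symchar (i : List Int) (p : Int) (d : Int) : List (String × String × Int × Int × List Int) :=
  if d < 100 then
    parse_symchar_rule0 i p (d + 1) ++ parse_symchar_rule1 i p (d + 1) ++
    parse_symchar_rule2 i p (d + 1) ++ parse_symchar_rule3 i p (d + 1) ++
    parse_symchar_rule4 i p (d + 1) ++ parse_symchar_rule5 i p (d + 1)
  else []

-- ===== PORT B =====
-- _TABLE of Source B: the literal dict, then the two module-level update loops.
def symTable : PySem.Dict Int String :=
  let t0 := PySem.Dict.ofList [(43, "rule0"), (42, "rule1"), (45, "rule2"), (47, "rule3")]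
  let t1 := (PySem.List.pyRange 97 123 1).foldl (fun t c => t.insert c "rule4") t0
  (PySem.List.pyRange 65 91 1).foldl (fun t c => t.insert c "rule5") t1

def parse_symchar_alt (i : List Int) (p : Int) (d : Int) : List (String × String × Int × Int × List Int) :=
  if d < 100 ∧ p < (i.length : Int) then
    match PySem.List.pyGet? i p with
    | some c =>
      match symTable.get? c with
      | some n => [("symchar", n, p, p + 1, [c])]
      | none => []
    | none => []  -- Python raises IndexError here; excluded by Pre_
  else []

-- ===== PRECONDITION & SPEC =====
-- Pre_ excludes exactly the inputs where BOTH programs raise IndexError: d < 100 with p below -len(i).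
def Pre_parse_symchar (i : List Int) (p : Int) (d : Int) : Prop := d < 100 → -(i.length : Int) ≤ p
instance (i : List Int) (p : Int) (d : Int) : Decidable (Pre_parse_symchar i p d) := by unfold Pre_parse_symchar; infer_instance
def pvWitness_parse_symchar : List Int × Int × Int := ([43, 98], 1, 0)

def Spec_parse_symchar (i : List Int) (p : Int) (d : Int) (out : List (String × String × Int × Int × List Int)) : Prop := out = parse_symchar_alt i p d
instance (i : List Int) (p : Int) (d : Int) (out : List (String × String × Int × Int × List Int)) : Decidable (Spec_parse_symchar i p d out) := by unfold Spec_parse_symchar; infer_instance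

-- ===== CLAIM =====
def Claim_equal_parse_symchar : Prop := ∀ (i : List Int) (p : Int) (d : Int), Dom_parse_symchar i p d → Pre_parse_symchar i p d → Spec_parse_symchar i p d (parse_symchar i p d)

-- ===== LEMMAS AND PROOFS =====
set_option maxRecDepth 8192 in
theorem symTable_keys : symTable.keys = [43, 42, 45, 47, 97, 98, 99, 100, 101, 102, 103, 104, 105, 106, 107, 108, 109, 110, 111, 112, 113, 114, 115, 116, 117, 118, 119, 120, 121, 122, 65, 66, 67, 68, 69, 70, 71, 72, 73, 74, 75, 76, 77, 78, 79, 80, 81, 82, 83, 84, 85, 86, 87, 88, 89, 90] := by decide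

set_option maxRecDepth 8192 in
theorem symTable_get (c : Int) :
    symTable.get? c =
      if c = 43 then some "rule0" else if c = 42 then some "rule1"
      else if c = 45 then some "rule2" else if c = 47 then some "rule3"
      else if 97 ≤ c ∧ c ≤ 122 then some "rule4"
      else if 65 ≤ c ∧ c ≤ 90 then some "rule5" else none := by
  by_cases h : c ∈ symTable.keys
  · rw [symTable_keys] at h
    fin_cases h <;> decide
  · have hnone : symTable.get? c = none := (PySem.Dict.get?_eq_none_iff_not_mem_keys symTable c).mpr h
    rw [symTable_keys] at h
    simp only [List.mem_cons, List.not_mem_nil, or_false, not_or] at h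
    rw [hnone]
    split_ifs <;> first | rfl | omega

set_option maxRecDepth 8192 in
theorem parse_symchar_eq_alt (i : List Int) (p : Int) (d : Int)
    (hpre : Pre_parse_symchar i p d) : parse_symchar i p d = parse_symchar_alt i p d := by
  unfold parse_symchar parse_symchar_alt
  by_cases hd : d < 100
  · have hlo : -(i.length : Int) ≤ p := hpre hd
    by_cases hp : p < (i.length : Int)
    · obtain ⟨c, hc⟩ : ∃ c, PySem.List.pyGet? i p = some c := by
        rcases h : PySem.List.pyGet? i p with _ | c
        · rw [PySem.List.pyGet?_eq_none_iff] at h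
          exact absurd ⟨hlo, hp⟩ h
        · exact ⟨c, rfl⟩
      simp only [parse_symchar_rule0, parse_symchar_rule1, parse_symchar_rule2,
        parse_symchar_rule3, parse_symchar_rule4, parse_symchar_rule5,
        hd, hp, hc, if_pos, and_true]
      rw [symTable_get c]
      split_ifs <;> simp_all <;> omega
    · simp [parse_symchar_rule0, parse_symchar_rule1, parse_symchar_rule2,
        parse_symchar_rule3, parse_symchar_rule4, parse_symchar_rule5, hd, hp]
  · simp [hd]

-- ===== VERDICT =====
theorem parse_symchar_spec : Claim_equal_parse_symchar := by
  intro i p d _ hpre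
  exact parse_symchar_eq_alt i p d hpre
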